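-- pv_equiv track=rewrite | github.com/bener07/UPnP-console | consoleProgram/UPnPDevice.py | __filter_url
-- ===== SOURCE A (Python) =====
-- def __filter_url(url):
-- 	splitURL = url.split('/')
-- 	for string in splitURL:
-- 		indexLocation = splitURL.index(string)
-- 		for checkString in splitURL:
-- 			if string == checkString and indexLocation != splitURL.index(checkString):
-- 				splitURL.remove(checkString)
-- 	url = "/".join(splitURL)
-- 	return (url).replace('///', '/').replace('//', '/').replace(':/', '://')
-- ===== SOURCE B (Python) =====
-- def __filter_url(url):
--     # The original split and nested removal loops are a provable no-op: .index() of equal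
--     # strings always returns the same first-occurrence index, so nothing is ever
--     # removed, and "/".join(url.split('/')) reconstructs url exactly.
--     return url.replace('///', '/').replace('//', '/').replace(':/', '://')
-- ===== Notes on version B (the rewrite author's own statement) =====
-- stated objective: simpler
-- what changed: Dropped the split plus nested duplicate-removal loops entirely (they provably never remove anything, since list.index of equal strings always returns the same first-occurrence position, and joining the split parts reconstructs the input exactly), leaving only the three replace calls.
import Mathlib
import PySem

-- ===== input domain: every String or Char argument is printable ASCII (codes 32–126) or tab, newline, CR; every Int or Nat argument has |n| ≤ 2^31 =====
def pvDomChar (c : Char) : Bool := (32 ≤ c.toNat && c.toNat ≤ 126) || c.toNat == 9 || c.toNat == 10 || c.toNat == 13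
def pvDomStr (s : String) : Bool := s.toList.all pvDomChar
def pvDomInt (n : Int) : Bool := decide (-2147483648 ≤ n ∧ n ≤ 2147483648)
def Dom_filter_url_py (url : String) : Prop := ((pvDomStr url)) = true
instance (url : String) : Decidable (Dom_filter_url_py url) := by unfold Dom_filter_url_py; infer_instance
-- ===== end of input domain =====

-- B drops A's split + nested "dedup" loops (a provable no-op) and keeps only the
-- three replace calls; objective: simpler.

-- ===== PORT A =====
-- inner 'for checkString in splitURL' loop: Python iterates by a cursor j over the
-- (possibly shrinking) list; condition and remove exactly as in the source.
-- The Nat fuel (passed as lst.length, one unit per iteration; len - j shrinks every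
-- step) only makes the recursion structural; when it hits 0 the cursor is already
-- past the end, so the fuel-0 branch returns the list exactly as the cursor check does.
def filterInner (s : String) (idx : Option Nat) : Nat → List String → Nat → List String
  | 0, lst, _ => lst
  | fuel + 1, lst, j =>
    if h : j < lst.length then
      if s = lst[j] ∧ idx ≠ PySem.List.index? lst lst[j] then
        filterInner s idx fuel ((PySem.List.remove? lst lst[j]).getD lst) (j + 1)
      else
        filterInner s idx fuel lst (j + 1)
    else lst

-- outer 'for string in splitURL' loop, cursor i, same fuel discipline
def filterOuter : Nat → List String → Nat → List String
  | 0, lst, _ => lst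
  | fuel + 1, lst, i =>
    if h : i < lst.length then
      filterOuter fuel (filterInner lst[i] (PySem.List.index? lst lst[i]) lst.length lst 0) (i + 1)
    else lst

def filter_url_py (url : String) : String :=
  let splitURL := (PySem.Str.split? url "/").getD []
  let splitURL := filterOuter splitURL.length splitURL 0
  let url2 := PySem.Str.join "/" splitURL
  PySem.Str.replace (PySem.Str.replace (PySem.Str.replace url2 "///" "/") "//" "/") ":/" "://"

-- ===== PORT B =====
def filter_url_py_alt (url : String) : String :=
  PySem.Str.replace (PySem.Str.replace (PySem.Str.replace url "///" "/") "//" "/") ":/" "://"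

-- ===== PRECONDITION & SPEC =====
def Spec_filter_url_py (url : String) (out : String) : Prop := out = filter_url_py_alt url
instance (url : String) (out : String) : Decidable (Spec_filter_url_py url out) := by unfold Spec_filter_url_py; infer_instance

-- ===== CLAIM (what is proved, stated in full; the proofs are below) =====
def Claim_equal_filter_url_py : Prop := ∀ (url : String), Dom_filter_url_py url → Spec_filter_url_py url (filter_url_py url)

-- ===== LEMMAS AND PROOFS =====

-- the inner loop never removes anything: when s = lst[j], both .index calls agree
theorem filterInner_id (s : String) :
    ∀ (fuel : Nat) (lst : List String) (j : Nat),
      filterInner s (PySem.List.index? lst s) fuel lst j = lst := by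
  intro fuel
  induction fuel with
  | zero => intro lst j; rfl
  | succ fuel ih =>
    intro lst j
    rw [filterInner]
    split
    · rename_i h
      have hcond : ¬ (s = lst[j] ∧ PySem.List.index? lst s ≠ PySem.List.index? lst lst[j]) := by
        rintro ⟨heq, hne⟩
        exact hne (by rw [heq])
      rw [if_neg hcond]
      exact ih lst (j + 1)
    · rfl

-- hence the outer loop is the identity
theorem filterOuter_id : ∀ (fuel : Nat) (lst : List String) (i : Nat),
    filterOuter fuel lst i = lst := by
  intro fuel
  induction fuel with
  | zero => intro lst i; rfl
  | succ fuel ih =>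
    intro lst i
    rw [filterOuter]
    split
    · rw [filterInner_id]
      exact ih lst (i + 1)
    · rfl

-- PySem's splitOn with a singleton separator, in terms of core's List.splitOn
theorem go_singleton (c : Char) :
    ∀ (fuel : Nat) (l cur : List Char) (acc : List (List Char)), l.length < fuel →
      PySem.Chars.splitOn.go [c] fuel l cur acc
        = acc.reverse ++ (List.splitOn c l).modifyHead (cur.reverse ++ ·) := by
  intro fuel
  induction fuel with
  | zero => intro l cur acc h; omega
  | succ f ih =>
    intro l cur acc h
    cases l with
    | nil =>
      rw [PySem.Chars.splitOn.go.eq_def]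
      simp [List.splitOn_nil]
    | cons x rest =>
      rw [PySem.Chars.splitOn.go.eq_def]
      dsimp only
      by_cases hx : c = x
      · subst hx
        have hpre : [c].isPrefixOf (c :: rest) = true := by
          simp [List.isPrefixOf]
        rw [if_pos hpre]
        rw [ih _ _ _ (by simpa using Nat.lt_of_succ_lt_succ h)]
        simp [List.splitOn, List.splitOnP_cons]
        have hid : (fun x : List Char => x) = id := rfl
        rw [hid, List.modifyHead_id]
        rfl
      · have hpre : [c].isPrefixOf (x :: rest) = false := by
          simp [List.isPrefixOf]
          exact fun hcx => absurd hcx hx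
        rw [if_neg (by simp [hpre])]
        rw [ih _ _ _ (by simpa using Nat.lt_of_succ_lt_succ h)]
        have hx' : (x == c) = false := by
          simp
          exact fun hxc => hx hxc.symm
        simp [List.splitOn, List.splitOnP_cons, hx', List.modifyHead_modifyHead]
        rfl

-- join '/' (split '/' s) = s on character lists
theorem chars_split_join (c : Char) (s : List Char) :
    PySem.Chars.join [c] (PySem.Chars.splitOn s [c]) = s := by
  unfold PySem.Chars.splitOn PySem.Chars.join
  rw [go_singleton c (s.length + 1) s [] [] (by omega)]
  have hid : (fun x : List Char => x) = id := rfl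
  simp only [List.reverse_nil, List.nil_append, hid, List.modifyHead_id]
  exact List.intercalate_splitOn s c

-- ===== VERDICT (by name: the statement is the Claim_ definition above) =====
theorem filter_url_py_spec : Claim_equal_filter_url_py := by
  intro url _
  unfold Spec_filter_url_py filter_url_py filter_url_py_alt
  have hsplit : PySem.Str.split? url "/"
      = some ((PySem.Chars.splitOn url.toList ['/']).map String.ofList) := by
    simp [PySem.Str.split?, PySem.Chars.split?]
  rw [hsplit]
  simp only [Option.getD_some]
  rw [filterOuter_id]
  have hjoin : PySem.Str.join "/" ((PySem.Chars.splitOn url.toList ['/']).map String.ofList)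
      = url := by
    unfold PySem.Str.join
    have : (((PySem.Chars.splitOn url.toList ['/']).map String.ofList).map String.toList)
        = PySem.Chars.splitOn url.toList ['/'] := by
      simp [List.map_map, Function.comp_def, String.toList_ofList]
    rw [this]
    have : ("/" : String).toList = ['/'] := by decide
    rw [this, chars_split_join '/' url.toList, String.ofList_toList]
  rw [hjoin]
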